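-- pv_equiv track=rewrite | github.com/n1k1x86/pythonCodewars | 7kyu/count_red_beads.py | count_red_beads
-- ===== SOURCE A (Python) =====
-- def count_red_beads(n: int):
--     count = 0
--     while n > 0:
--         if n == 1:
--             return count
--         else:
--             count += 2
--             n -= 1
--     return count
-- ===== SOURCE B (Python) =====
-- def count_red_beads(n: int):
--     return max(0, 2 * (n - 1))
-- ===== Notes on version B (the rewrite author's own statement) =====
-- stated objective: faster
-- what changed: Replaced the decrementing while-loop accumulator with a single closed-form arithmetic expression max(0, 2*(n-1)).
import Mathlib
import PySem

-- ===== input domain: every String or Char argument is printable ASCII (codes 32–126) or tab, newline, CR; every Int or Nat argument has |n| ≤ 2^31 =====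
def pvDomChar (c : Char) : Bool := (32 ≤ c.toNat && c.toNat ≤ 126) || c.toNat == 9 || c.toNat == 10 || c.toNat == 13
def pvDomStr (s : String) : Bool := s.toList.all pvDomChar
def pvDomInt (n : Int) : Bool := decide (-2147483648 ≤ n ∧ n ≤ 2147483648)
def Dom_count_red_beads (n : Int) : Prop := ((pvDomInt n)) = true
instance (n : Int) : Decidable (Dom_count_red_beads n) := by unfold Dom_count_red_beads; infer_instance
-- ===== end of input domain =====

-- B replaces A's decrementing while-loop with the closed form max(0, 2*(n-1)) (objective: faster).

-- ===== PORT A =====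
-- the while-loop of A, step for step: state (count, n)
def count_red_beads_loop (count : Int) (n : Int) : Int :=
  if h : n > 0 then
    if n = 1 then count
    else count_red_beads_loop (count + 2) (n - 1)
  else count
termination_by n.toNat
decreasing_by omega

def count_red_beads (n : Int) : Int := count_red_beads_loop 0 n

-- ===== PORT B =====
def count_red_beads_alt (n : Int) : Int := max 0 (2 * (n - 1))

-- ===== PRECONDITION & SPEC =====
def Spec_count_red_beads (n : Int) (out : Int) : Prop := out = count_red_beads_alt n
instance (n : Int) (out : Int) : Decidable (Spec_count_red_beads n out) := by unfold Spec_count_red_beads; infer_instance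

-- ===== CLAIM (what is proved, stated in full; the proofs are below) =====
def Claim_equal_count_red_beads : Prop := ∀ (n : Int), Dom_count_red_beads n → Spec_count_red_beads n (count_red_beads n)

-- ===== LEMMAS AND PROOFS =====
theorem count_red_beads_loop_eq (count n : Int) :
    count_red_beads_loop count n = count + max 0 (2 * (n - 1)) := by
  induction count, n using count_red_beads_loop.induct with
  | case1 count h =>
    rw [count_red_beads_loop]
    simp
  | case2 count n h h1 ih =>
    rw [count_red_beads_loop]
    rw [dif_pos h, if_neg h1, ih]
    omega
  | case3 count n h =>
    rw [count_red_beads_loop]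
    rw [dif_neg h]
    omega

-- ===== VERDICT (by name: the statement is the Claim_ definition above) =====
theorem count_red_beads_spec : Claim_equal_count_red_beads := by
  intro n _
  unfold Spec_count_red_beads count_red_beads count_red_beads_alt
  rw [count_red_beads_loop_eq]; omega
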